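-- pv_equiv track=rewrite | github.com/standr80/royal-putts-golf-tracker | models.py | format_birdie_details
-- ===== SOURCE A (Python) =====
-- def format_birdie_details(player_birdies):
--     """Format birdie details for display"""
--     if not player_birdies:
--         return None, None
--
--     # Find players with the most birdies
--     max_birdies = max(len(birdies) for birdies in player_birdies.values())
--     top_players = [name for name, birdies in player_birdies.items()
--                   if len(birdies) == max_birdies]
--
--     # Format player names
--     player_text = " and ".join(top_players)
--
--     # Format details for each top player
--     details = []
--     for player in top_players:
--         holes = player_birdies[player]
--         details.append(f"{player}: {len(holes)} birdies (Holes: {', '.join(map(str, sorted(holes)))})")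
--
--     return player_text, " | ".join(details)
-- ===== SOURCE B (Python) =====
-- def format_birdie_details(player_birdies):
--     """Format birdie details for display"""
--     # One pass: index players by birdie count, then a single max-key lookup.
--     groups = {}
--     for name, birdies in player_birdies.items():
--         groups.setdefault(len(birdies), []).append(name)
--     if not groups:
--         return None, None
--     max_birdies = max(groups)
--     top_players = groups[max_birdies]
--     details = " | ".join(
--         f"{p}: {len(player_birdies[p])} birdies (Holes: {', '.join(map(str, sorted(player_birdies[p])))})"
--         for p in top_players
--     )
--     return " and ".join(top_players), details
-- ===== Notes on version B (the rewrite author's own statement) =====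
-- stated objective: alternative
-- what changed: A computes the max birdie count and then filters all players for it (compute-max-then-filter, two scans of the values); B makes one grouping pass building a count->players index, then reads the winners off with a single max-key lookup.
import Mathlib
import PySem

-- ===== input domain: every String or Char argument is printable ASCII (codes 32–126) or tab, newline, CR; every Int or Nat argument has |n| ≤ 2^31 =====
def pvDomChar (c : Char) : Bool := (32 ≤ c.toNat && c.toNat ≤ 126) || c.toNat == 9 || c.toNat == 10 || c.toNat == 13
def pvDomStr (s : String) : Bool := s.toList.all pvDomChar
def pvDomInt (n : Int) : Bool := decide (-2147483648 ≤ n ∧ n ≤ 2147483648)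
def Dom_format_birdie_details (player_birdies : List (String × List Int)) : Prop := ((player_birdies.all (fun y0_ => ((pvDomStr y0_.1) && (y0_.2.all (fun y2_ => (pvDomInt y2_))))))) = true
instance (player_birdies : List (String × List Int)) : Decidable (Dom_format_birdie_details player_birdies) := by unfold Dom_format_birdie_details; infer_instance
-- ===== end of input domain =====

-- B replaces A's compute-max-then-filter two scans by one grouping pass (count -> players index) plus a single max-key lookup; objective: alternative decomposition.


-- ===== PORT A =====
-- the f-string detail line for one top player ('holes' looked up in the dict; lookup cannot miss since the player comes from the dict's items)
def pvDetailA (pb : PySem.Dict String (List Int)) (player : String) : String :=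
  let holes := pb.getD player []
  player ++ ": " ++ PySem.Int.toStr (holes.length : Int) ++ " birdies (Holes: " ++
    PySem.Str.join ", " ((PySem.List.sorted holes (fun x => x) false).map PySem.Int.toStr) ++ ")"

def format_birdie_details (player_birdies : List (String × List Int)) : Option String × Option String :=
  if player_birdies = [] then (none, none) else
  -- max(len(birdies) for birdies in values); .getD 0 is never used: the list is nonempty here
  let max_birdies := (PySem.List.max? (player_birdies.map (fun p => ((p.2.length : Int)))) (fun x => x)).getD 0
  let top_players := (player_birdies.filter (fun p => ((p.2.length : Int) == max_birdies))).map (·.1)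
  let player_text := PySem.Str.join " and " top_players
  let details := top_players.foldl (fun acc player => acc ++ [pvDetailA (PySem.Dict.mk player_birdies) player]) []
  (some player_text, some (PySem.Str.join " | " details))

-- ===== PORT B =====
-- the generator's f-string for one top player (looked up twice in the dict, as in Source B)
def pvDetailB (pb : PySem.Dict String (List Int)) (p : String) : String :=
  p ++ ": " ++ PySem.Int.toStr ((pb.getD p []).length : Int) ++ " birdies (Holes: " ++
    PySem.Str.join ", " ((PySem.List.sorted (pb.getD p []) (fun x => x) false).map PySem.Int.toStr) ++ ")"

def format_birdie_details_alt (player_birdies : List (String × List Int)) : Option String × Option String :=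
  -- groups.setdefault(len(birdies), []).append(name) == modify with default []
  let groups := player_birdies.foldl
    (fun d p => d.modify ((p.2.length : Int)) [] (· ++ [p.1])) PySem.Dict.empty
  if groups.items = [] then (none, none) else
  -- max(groups) iterates the keys; .getD 0 never used (groups nonempty here)
  let max_birdies := (PySem.List.max? groups.keys (fun x => x)).getD 0
  let top_players := groups.getD max_birdies []
  (some (PySem.Str.join " and " top_players),
   some (PySem.Str.join " | " (top_players.map (pvDetailB (PySem.Dict.mk player_birdies)))))

-- ===== PRECONDITION & SPEC =====
def Spec_format_birdie_details (player_birdies : List (String × List Int)) (out : Option String × Option String) : Prop := out = format_birdie_details_alt player_birdies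
instance (player_birdies : List (String × List Int)) (out : Option String × Option String) : Decidable (Spec_format_birdie_details player_birdies out) := by unfold Spec_format_birdie_details; infer_instance

-- ===== CLAIM (what is proved, stated in full; the proofs are below) =====
def Claim_equal_format_birdie_details : Prop := ∀ (player_birdies : List (String × List Int)), Dom_format_birdie_details player_birdies → Spec_format_birdie_details player_birdies (format_birdie_details player_birdies)

-- ===== LEMMAS AND PROOFS =====

-- the grouping fold, written with an explicit (key, value) pair list
theorem pv_groups_eq (xs : List (String × List Int)) :
    xs.foldl (fun d p => d.modify ((p.2.length : Int)) [] (· ++ [p.1])) PySem.Dict.empty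
    = (xs.map (fun p => (((p.2.length : Int)), p.1))).foldl
        (fun d q => d.modify q.1 [] (· ++ [q.2])) PySem.Dict.empty := by
  rw [List.foldl_map]

theorem pv_groups_keys (xs : List (String × List Int)) :
    (xs.foldl (fun d p => d.modify ((p.2.length : Int)) [] (· ++ [p.1])) PySem.Dict.empty).keys
    = PySem.Set.ofList (xs.map (fun p => ((p.2.length : Int)))) := by
  rw [PySem.Dict.keys_foldl_modify_key]
  simp [PySem.Dict.keys_empty, PySem.Set.update_nil_left]

-- max over the distinct keys = max over all lengths
theorem pv_max_dedup (xs : List Int) (hx : xs ≠ []) :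
    (PySem.List.max? (PySem.Set.ofList xs) (fun x => x)).getD 0
    = (PySem.List.max? xs (fun x => x)).getD 0 := by
  obtain ⟨m1, h1⟩ : ∃ m, PySem.List.max? (PySem.Set.ofList xs) (fun x => x) = some m := by
    rcases h : PySem.List.max? (PySem.Set.ofList xs) (fun x => x) with _ | m
    · rw [PySem.List.max?_eq_none_iff] at h
      cases xs with
      | nil => exact absurd rfl hx
      | cons a t =>
        have hmem : a ∈ PySem.Set.ofList (a :: t) := by
          rw [PySem.Set.mem_ofList]; exact List.mem_cons_self
        rw [h] at hmem; exact absurd hmem (by simp)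
    · exact ⟨m, rfl⟩
  obtain ⟨m2, h2⟩ : ∃ m, PySem.List.max? xs (fun x => x) = some m := by
    rcases h : PySem.List.max? xs (fun x => x) with _ | m
    · rw [PySem.List.max?_eq_none_iff] at h; exact absurd h hx
    · exact ⟨m, rfl⟩
  rw [h1, h2]
  have hm1 : m1 ∈ xs := by
    have := PySem.List.max?_mem h1; rwa [PySem.Set.mem_ofList] at this
  have hm2 : m2 ∈ PySem.Set.ofList xs := by
    rw [PySem.Set.mem_ofList]; exact PySem.List.max?_mem h2
  have le1 : m1 ≤ m2 := PySem.List.max?_isMax h2 m1 hm1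
  have le2 : m2 ≤ m1 := PySem.List.max?_isMax h1 m2 hm2
  simpa using le_antisymm le1 le2

-- the max group is exactly A's filtered player list
theorem pv_group_lookup (xs : List (String × List Int)) (c : Int) :
    ((xs.map (fun p => (((p.2.length : Int)), p.1))).foldl
        (fun d q => d.modify q.1 [] (· ++ [q.2])) PySem.Dict.empty).getD c []
    = (xs.filter (fun p => ((p.2.length : Int) == c))).map (·.1) := by
  rw [PySem.Dict.getD_foldl_modify_append]
  simp [PySem.Dict.getD_empty, List.filter_map, Function.comp_def]

theorem format_birdie_details_spec' (xs : List (String × List Int)) :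
    format_birdie_details xs = format_birdie_details_alt xs := by
  by_cases hx : xs = []
  · subst hx; rfl
  · unfold format_birdie_details format_birdie_details_alt
    rw [if_neg hx]
    have hkeys := pv_groups_keys xs
    have hgne : (xs.foldl (fun d p => d.modify ((p.2.length : Int)) [] (· ++ [p.1]))
        PySem.Dict.empty).items ≠ [] := by
      intro h
      have : (xs.foldl (fun d p => d.modify ((p.2.length : Int)) [] (· ++ [p.1]))
          PySem.Dict.empty).keys = [] := by simp [PySem.Dict.keys, h]
      rw [hkeys] at this
      cases xs with
      | nil => exact hx rfl
      | cons a t =>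
        have hmem : ((a.2.length : Int)) ∈ PySem.Set.ofList ((a :: t).map (fun p => ((p.2.length : Int)))) := by
          rw [PySem.Set.mem_ofList]; simp
        rw [this] at hmem; exact absurd hmem (by simp)
    rw [if_neg hgne]
    have hmax : (PySem.List.max? (xs.foldl (fun d p => d.modify ((p.2.length : Int)) [] (· ++ [p.1])) PySem.Dict.empty).keys (fun x => x)).getD 0
        = (PySem.List.max? (xs.map (fun p => ((p.2.length : Int)))) (fun x => x)).getD 0 := by
      rw [hkeys, pv_max_dedup _ (by simpa using hx)]
    rw [hmax]
    simp only [pv_groups_eq, pv_group_lookup, PySem.List.foldl_append_singleton_eq_map,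
      List.nil_append]
    refine Prod.ext rfl ?_
    simp only [Option.some.injEq]
    apply congrArg
    apply List.map_congr_left
    intro x hx
    simp [pvDetailA, pvDetailB]

-- ===== VERDICT (by name: the statement is the Claim_ definition above) =====
theorem format_birdie_details_spec : Claim_equal_format_birdie_details := by
  intro xs _
  unfold Spec_format_birdie_details
  exact format_birdie_details_spec' xs
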